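-- pv_equiv track=rewrite | github.com/pypi-data/pypi-mirror-402 | packages/vgrid/vgrid-1.4.10-py3-none-any.whl/vgrid/dggs/digipin.py | digipin_parent
-- ===== SOURCE A (Python) =====
-- from typing import Dict, Tuple, Union
--
-- def digipin_parent(pin: str) -> Union[str, str]:
--     """
--     Get the parent DIGIPIN code by removing the last character.
--     If the pin is at level 1 (smallest resolution), returns itself.
--
--     Parameters
--     ----------
--     pin : str
--         DIGIPIN code (with or without dashes)
--
--     Returns
--     -------
--     str
--         Parent DIGIPIN code with dashes, or 'Invalid DIGIPIN' if the code is invalid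
--
--     Examples
--     --------
--     >>> digipin_parent('F3K-492')
--     'F3K-49'
--     >>> digipin_parent('F3K')
--     'F3K'
--     >>> digipin_parent('F')
--     'F'
--     """
--     # Remove dashes
--     clean = pin.replace("-", "")
--
--     if len(clean) < 1:
--         return "Invalid DIGIPIN"
--
--     # If at level 1 (smallest resolution), parent is itself
--     if len(clean) == 1:
--         return pin
--
--     # Remove last character
--     parent_clean = clean[:-1]
--
--     # Add dashes back after 3rd and 6th characters
--     parent_with_dashes = ""
--     for i, char in enumerate(parent_clean):
--         parent_with_dashes += char
--         if (i == 2 and len(parent_clean) > 3) or (i == 5 and len(parent_clean) > 6):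
--             parent_with_dashes += "-"
--
--     return parent_with_dashes
-- ===== SOURCE B (Python) =====
-- def digipin_parent(pin: str) -> str:
--     clean = pin.replace("-", "")
--     if len(clean) < 1:
--         return "Invalid DIGIPIN"
--     if len(clean) == 1:
--         return pin
--     p = clean[:-1]
--     L = len(p)
--     return p[:3] + ("-" if L > 3 else "") + p[3:6] + ("-" if L > 6 else "") + p[6:]
-- ===== Notes on version B (the rewrite author's own statement) =====
-- stated objective: simpler
-- what changed: Replaces the per-character enumerate loop (appending each char and testing its index for dash insertion) with direct segmentation: slice the parent code into its three fixed groups and join them with conditional dashes.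
import Mathlib
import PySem

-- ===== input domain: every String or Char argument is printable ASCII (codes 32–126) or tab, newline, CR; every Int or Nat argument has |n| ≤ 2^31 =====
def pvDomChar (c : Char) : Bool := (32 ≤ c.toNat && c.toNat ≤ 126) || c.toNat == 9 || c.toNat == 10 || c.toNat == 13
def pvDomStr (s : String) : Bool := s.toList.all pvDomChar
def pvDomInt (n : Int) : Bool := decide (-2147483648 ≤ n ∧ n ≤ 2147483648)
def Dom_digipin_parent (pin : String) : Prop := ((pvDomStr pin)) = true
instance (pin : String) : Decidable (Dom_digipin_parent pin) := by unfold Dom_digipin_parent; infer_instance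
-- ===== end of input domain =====

-- B replaces A's per-character dash-insertion loop with direct slicing into the
-- three fixed groups joined by conditional dashes (simpler decomposition).

-- ===== PORT A =====
def digipin_parent (pin : String) : String :=
  let clean := PySem.Chars.replace pin.toList ['-'] []
  if clean.length < 1 then "Invalid DIGIPIN"
  else if clean.length == 1 then pin
  else
    let parent_clean := PySem.List.slice clean none (some (-1))
    let parent_with_dashes := (PySem.List.enumerate parent_clean 0).foldl
      (fun acc ic =>
        let acc := acc ++ [ic.2]
        if (ic.1 == 2 && decide (parent_clean.length > 3)) ||
           (ic.1 == 5 && decide (parent_clean.length > 6)) then acc ++ ['-'] else acc) []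
    String.ofList parent_with_dashes

-- ===== PORT B =====
def digipin_parent_alt (pin : String) : String :=
  let clean := PySem.Chars.replace pin.toList ['-'] []
  if clean.length < 1 then "Invalid DIGIPIN"
  else if clean.length == 1 then pin
  else
    let p := PySem.List.slice clean none (some (-1))
    let L := p.length
    String.ofList (PySem.List.slice p none (some 3) ++ (if L > 3 then ['-'] else []) ++
               PySem.List.slice p (some 3) (some 6) ++ (if L > 6 then ['-'] else []) ++
               PySem.List.slice p (some 6) none)

-- ===== PRECONDITION & SPEC =====
def Spec_digipin_parent (pin : String) (out : String) : Prop := out = digipin_parent_alt pin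
instance (pin : String) (out : String) : Decidable (Spec_digipin_parent pin out) := by unfold Spec_digipin_parent; infer_instance

-- ===== CLAIM (what is proved, stated in full; the proofs are below) =====
def Claim_equal_digipin_parent : Prop := ∀ (pin : String), Dom_digipin_parent pin → Spec_digipin_parent pin (digipin_parent pin)

-- ===== LEMMAS AND PROOFS =====

-- Beyond index 5 the loop body never inserts a dash.
theorem pv_tail (b3 b6 : Bool) :
    ∀ (t : List Char) (s : Int), 6 ≤ s →
      (PySem.List.enumerate t s).flatMap
        (fun ic => [ic.2] ++ (if (ic.1 == 2 && b3) || (ic.1 == 5 && b6) then ['-'] else [])) = t := by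
  intro t
  induction t with
  | nil => intro s _; simp [PySem.List.enumerate_nil]
  | cons a t ih =>
      intro s hs
      rw [PySem.List.enumerate_cons, List.flatMap_cons, ih (s+1) (by omega)]
      simp [show s ≠ (2:Int) by omega, show s ≠ (5:Int) by omega]

theorem pv_core (p : List Char) :
    (PySem.List.enumerate p 0).foldl
      (fun acc ic =>
        let acc := acc ++ [ic.2]
        if (ic.1 == 2 && decide (p.length > 3)) ||
           (ic.1 == 5 && decide (p.length > 6)) then acc ++ ['-'] else acc) []
    = p.take 3 ++ (if p.length > 3 then ['-'] else []) ++
      (p.drop 3).take 3 ++ (if p.length > 6 then ['-'] else []) ++ p.drop 6 := by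
  have hfold :
      (PySem.List.enumerate p 0).foldl
        (fun acc ic =>
          let acc := acc ++ [ic.2]
          if (ic.1 == 2 && decide (p.length > 3)) ||
             (ic.1 == 5 && decide (p.length > 6)) then acc ++ ['-'] else acc) []
      = (PySem.List.enumerate p 0).flatMap
          (fun ic => [ic.2] ++ (if (ic.1 == 2 && decide (p.length > 3)) ||
             (ic.1 == 5 && decide (p.length > 6)) then ['-'] else [])) := by
    have hfun : (fun (acc : List Char) (ic : Int × Char) =>
          let acc := acc ++ [ic.2]
          if (ic.1 == 2 && decide (p.length > 3)) ||
             (ic.1 == 5 && decide (p.length > 6)) then acc ++ ['-'] else acc)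
        = fun acc ic => acc ++ ([ic.2] ++ (if (ic.1 == 2 && decide (p.length > 3)) ||
             (ic.1 == 5 && decide (p.length > 6)) then ['-'] else [])) := by
      funext acc ic
      by_cases h : (ic.1 == 2 && decide (p.length > 3)) ||
             (ic.1 == 5 && decide (p.length > 6)) <;> simp [h]
    rw [hfun, PySem.List.foldl_append_eq_flatMap]
    simp
  rw [hfold]
  match p with
  | [] => simp
  | [a] => simp [PySem.List.enumerate_cons]
  | [a,b] => simp [PySem.List.enumerate_cons]
  | [a,b,c] => simp [PySem.List.enumerate_cons]
  | [a,b,c,d] => simp [PySem.List.enumerate_cons]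
  | [a,b,c,d,e] => simp [PySem.List.enumerate_cons]
  | [a,b,c,d,e,f] => simp [PySem.List.enumerate_cons]
  | a::b::c::d::e::f::g::t =>
      have ht := pv_tail (decide ((a::b::c::d::e::f::g::t).length > 3))
        (decide ((a::b::c::d::e::f::g::t).length > 6)) (g::t) 6 (by omega)
      simp only [PySem.List.enumerate_cons, List.flatMap_cons] at ht ⊢
      simp_all

-- ===== VERDICT (by name: the statement is the Claim_ definition above) =====
theorem digipin_parent_spec : Claim_equal_digipin_parent := by
  intro pin _
  unfold Spec_digipin_parent digipin_parent digipin_parent_alt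
  set clean := PySem.Chars.replace pin.toList ['-'] [] with hclean
  by_cases h1 : clean.length < 1
  · simp [h1]
  · by_cases h2 : clean.length == 1
    · simp [h1, h2]
    · simp only [h1, h2, if_false, Bool.false_eq_true]
      rw [pv_core]
      simp [PySem.List.slice_to_neg_one, PySem.List.slice_to, PySem.List.slice_from,
            PySem.List.slice_toNat]
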